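-- pv_equiv track=rewrite | github.com/kyamashiro/atcoder | abc243/abc243_d/main.py | solve
-- ===== SOURCE A (Python) =====
-- def solve(N, X, S):
--     T = []
--
--     for i in range(N):
--         # LまたはRの次にUが来る場合は元の場所に戻るだけなので削除してOK
--         if S[i] == "U" and len(T) > 0 and (T[-1] == "L" or T[-1] == "R"):
--             T.pop()
--         else:
--             T.append(S[i])
--
--     for t in T:
--         # 現在地
--         if (t == "U"):
--             X = X // 2
--         if (t == "L"):
--             X = X * 2
--         if (t == "R"):
--             X = X * 2 + 1
--
--     return X
-- ===== SOURCE B (Python) =====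
-- def solve(N, X, S):
--     # Direct one-pass simulation: no stack; (2X)//2 == X and (2X+1)//2 == X
--     # make an L/R immediately undone by U a no-op automatically.
--     for t in S[:max(0, N)]:
--         if t == "U":
--             X = X // 2
--         elif t == "L":
--             X = 2 * X
--         elif t == "R":
--             X = 2 * X + 1
--     return X
-- ===== Notes on version B (the rewrite author's own statement) =====
-- stated objective: simpler
-- what changed: B drops A's first pass that builds a cancellation stack and simulates the moves directly in one pass, relying on the integer identities (2X)//2 == X and (2X+1)//2 == X.
import Mathlib
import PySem

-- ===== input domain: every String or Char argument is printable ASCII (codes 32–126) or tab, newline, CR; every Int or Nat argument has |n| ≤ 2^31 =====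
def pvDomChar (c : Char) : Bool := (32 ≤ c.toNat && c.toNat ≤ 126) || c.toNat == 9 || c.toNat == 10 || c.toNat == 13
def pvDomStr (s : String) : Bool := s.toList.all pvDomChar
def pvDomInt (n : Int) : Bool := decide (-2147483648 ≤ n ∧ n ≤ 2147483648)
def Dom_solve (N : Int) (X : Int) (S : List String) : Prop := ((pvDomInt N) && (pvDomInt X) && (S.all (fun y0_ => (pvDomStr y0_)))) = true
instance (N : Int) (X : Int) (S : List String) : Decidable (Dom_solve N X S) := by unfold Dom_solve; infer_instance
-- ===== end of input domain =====

-- B replaces A's stack-building first pass by a direct one-pass simulation (simpler; same cost).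

-- ===== PORT A =====
-- first pass: build the reduced move list T (T.pop() on a nonempty list = dropLast)
def solveStack (S : List String) (N : Int) : List String :=
  (PySem.List.pyRange 0 N 1).foldl (fun T i =>
    let s := PySem.List.pyGetD S i ""
    if s = "U" ∧ T.length > 0 ∧
        (PySem.List.pyGetD T (-1) "" = "L" ∨ PySem.List.pyGetD T (-1) "" = "R")
    then T.dropLast
    else T ++ [s]) []

def solve (N : Int) (X : Int) (S : List String) : Int :=
  (solveStack S N).foldl (fun X t =>
    let X1 := if t = "U" then PySem.Int.floordiv X 2 else X
    let X2 := if t = "L" then X1 * 2 else X1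
    if t = "R" then X2 * 2 + 1 else X2) X

-- ===== PORT B =====
def solve_alt (N : Int) (X : Int) (S : List String) : Int :=
  (PySem.List.slice S none (some (max 0 N))).foldl (fun X t =>
    if t = "U" then PySem.Int.floordiv X 2
    else if t = "L" then 2 * X
    else if t = "R" then 2 * X + 1
    else X) X

-- ===== PRECONDITION & SPEC =====
-- A indexes S[i] for i in range(N): it raises IndexError exactly when N > len(S).
def Pre_solve (N : Int) (X : Int) (S : List String) : Prop := N ≤ (S.length : Int)
instance (N : Int) (X : Int) (S : List String) : Decidable (Pre_solve N X S) := by unfold Pre_solve; infer_instance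
def pvWitness_solve : Int × Int × List String := (3, 5, ["L", "R", "U"])

def Spec_solve (N : Int) (X : Int) (S : List String) (out : Int) : Prop := out = solve_alt N X S
instance (N : Int) (X : Int) (S : List String) (out : Int) : Decidable (Spec_solve N X S out) := by unfold Spec_solve; infer_instance

-- ===== CLAIM (what is proved, stated in full; the proofs are below) =====
def Claim_equal_solve : Prop := ∀ (N : Int) (X : Int) (S : List String), Dom_solve N X S → Pre_solve N X S → Spec_solve N X S (solve N X S)

-- ===== LEMMAS AND PROOFS =====

-- B's per-move step
def bStep (X : Int) (t : String) : Int :=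
  if t = "U" then PySem.Int.floordiv X 2
  else if t = "L" then 2 * X
  else if t = "R" then 2 * X + 1
  else X

lemma aStep_eq_bStep (X : Int) (t : String) :
    (let X1 := if t = "U" then PySem.Int.floordiv X 2 else X
     let X2 := if t = "L" then X1 * 2 else X1
     if t = "R" then X2 * 2 + 1 else X2) = bStep X t := by
  unfold bStep
  by_cases hU : t = "U" <;> by_cases hL : t = "L" <;> by_cases hR : t = "R" <;>
    simp_all [mul_comm]

lemma bStep_L_U (Y : Int) : bStep (bStep Y "L") "U" = Y := by
  simp only [bStep, String.reduceEq, if_false, if_true]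
  rw [PySem.Int.floordiv_eq_ediv_of_pos (by omega)]
  omega

lemma bStep_R_U (Y : Int) : bStep (bStep Y "R") "U" = Y := by
  simp only [bStep, String.reduceEq, if_false, if_true]
  rw [PySem.Int.floordiv_eq_ediv_of_pos (by omega)]
  omega

-- the one stack operation of A, as a function of the token
def stk (T : List String) (s : String) : List String :=
  if s = "U" ∧ T.length > 0 ∧
      (PySem.List.pyGetD T (-1) "" = "L" ∨ PySem.List.pyGetD T (-1) "" = "R")
  then T.dropLast
  else T ++ [s]

lemma pyGetD_neg_one (T : List String) (hT : T ≠ []) :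
    PySem.List.pyGetD T (-1) "" = T.getLast hT := by
  have h1 : 0 < T.length := List.length_pos_iff.mpr hT
  simp [PySem.List.pyGetD, PySem.List.pyGet?, PySem.List.pyIdx?]
  rw [if_pos (by omega)]
  simp [List.getElem?_eq_getElem (by omega : T.length - 1 < T.length), List.getLast_eq_getElem]

-- stack correctness: applying bStep after one stk-move = one bStep move
lemma apply_stk (T : List String) (s : String) (X : Int) :
    (stk T s).foldl bStep X = bStep (T.foldl bStep X) s := by
  unfold stk
  split_ifs with h
  · obtain ⟨hU, hlen, hlast⟩ := h
    have hT : T ≠ [] := by intro hnil; simp [hnil] at hlen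
    have hdec : T = T.dropLast ++ [T.getLast hT] := (List.dropLast_append_getLast hT).symm
    rw [pyGetD_neg_one T hT] at hlast
    subst hU
    conv_rhs => rw [hdec]
    rw [List.foldl_append]
    rcases hlast with h | h <;> rw [h] <;> simp [bStep_L_U, bStep_R_U]
  · rw [List.foldl_append]
    rfl

lemma build_apply (L : List String) (T : List String) (X : Int) :
    (L.foldl stk T).foldl bStep X = L.foldl bStep (T.foldl bStep X) := by
  induction L generalizing T X with
  | nil => rfl
  | cons t L ih =>
      simp only [List.foldl_cons]
      rw [ih, apply_stk]

-- the index loop over range(N) is a fold over the take-N prefix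
lemma foldl_pyRange_take {β : Type} (S : List String) (g : β → String → β) (init : β) :
    ∀ n : Nat, n ≤ S.length →
      (PySem.List.pyRange 0 (n : Int) 1).foldl (fun a i => g a (PySem.List.pyGetD S i "")) init
        = (S.take n).foldl g init := by
  intro n
  induction n generalizing init with
  | zero => intro _; simp
  | succ n ih =>
      intro h
      have hlt : n < S.length := by omega
      have hc : ((n + 1 : Nat) : Int) = (n : Int) + 1 := by push_cast; ring
      rw [hc, PySem.List.pyRange_one_succ_right (by positivity), List.foldl_append,
        ih init (by omega)]
      have hta : List.take (n + 1) S = List.take n S ++ [S[n]] := by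
        rw [List.take_add_one, List.getElem?_eq_getElem hlt]
        rfl
      rw [hta, List.foldl_append]
      simp [PySem.List.pyGetD_natCast, List.getD_eq_getElem?_getD,
        List.getElem?_eq_getElem hlt]

lemma stack_eq_take (S : List String) (N : Int) (h0 : 0 ≤ N) (hN : N ≤ (S.length : Int)) :
    solveStack S N = (S.take N.toNat).foldl stk [] := by
  unfold solveStack
  show (PySem.List.pyRange 0 N 1).foldl (fun T i => stk T (PySem.List.pyGetD S i "")) [] = _
  rw [show N = ((N.toNat : Nat) : Int) by omega]
  exact foldl_pyRange_take S stk [] N.toNat (by omega)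

lemma slice_eq_take (S : List String) (N : Int) :
    PySem.List.slice S none (some (max 0 N)) = S.take N.toNat := by
  rw [PySem.List.slice_to S (le_max_left 0 N)]
  congr 1
  omega

-- ===== VERDICT (by name: the statement is the Claim_ definition above) =====
theorem solve_spec : Claim_equal_solve := by
  intro N X S _ hpre
  unfold Spec_solve solve solve_alt Pre_solve at *
  rw [slice_eq_take]
  have hfold : ∀ (T : List String) (Y : Int),
      T.foldl (fun X t =>
        let X1 := if t = "U" then PySem.Int.floordiv X 2 else X
        let X2 := if t = "L" then X1 * 2 else X1
        if t = "R" then X2 * 2 + 1 else X2) Y = T.foldl bStep Y := by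
    intro T
    induction T with
    | nil => intro Y; rfl
    | cons t T ih => intro Y; simp only [List.foldl_cons]; rw [aStep_eq_bStep, ih]
  rw [hfold]
  have hfoldB : (S.take N.toNat).foldl (fun X t =>
      if t = "U" then PySem.Int.floordiv X 2
      else if t = "L" then 2 * X
      else if t = "R" then 2 * X + 1
      else X) X = (S.take N.toNat).foldl bStep X := rfl
  rw [hfoldB]
  by_cases h0 : 0 ≤ N
  · rw [stack_eq_take S N h0 hpre]
    simpa using build_apply (S.take N.toNat) [] X
  · have hn : N.toNat = 0 := by omega
    have : solveStack S N = [] := by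
      unfold solveStack
      rw [PySem.List.pyRange_one_eq_nil (by omega)]
      rfl
    rw [this, hn]
    rfl
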